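-- pv_equiv track=rewrite | github.com/justgotothedesk/Algorithm_Study | Programmers/[PCCE 기출문제] 10번(공원).py | solution
-- ===== SOURCE A (Python) =====
-- def solution(mats, park):
--     answer = -1
--
--     for mat in mats:
--         for i in range(len(park)):
--             for j in range(len(park[0])):
--                 count = 0
--
--                 for row in range(mat):
--                     for col in range(mat):
--                         if (row+i >= len(park)) or (col+j >= len(park[0])):
--                             continue
--                         if park[i+row][j+col] == "-1":
--                             count += 1
--
--                 if count == mat**2:
--                     answer = max(answer, mat)
--
--     return answer
-- ===== SOURCE B (Python) =====
-- def solution(mats, park):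
--     R = len(park)
--     C = len(park[0]) if park else 0
--     # one pass: runs[i][j] = length of the consecutive "-1" run in row i ending at column j
--     runs = []
--     for row in park:
--         s = []
--         run = 0
--         for x in row[:C]:
--             run = run + 1 if x == "-1" else 0
--             s.append(run)
--         runs.append(s)
--     best = -1
--     for m in mats:
--         if 0 <= m and m <= R and m <= C:
--             if any(all(runs[i + r][j + m - 1] >= m for r in range(m))
--                    for i in range(R - m + 1) for j in range(C - m + 1)):
--                 best = max(best, m)
--     return best
-- ===== Notes on version B (the rewrite author's own statement) =====
-- stated objective: faster
-- what changed: B precomputes, in one pass over the grid, the length of the consecutive '-1' run ending at each cell, so a mat x mat square is checked with mat row-run lookups instead of scanning all mat^2 cells, and only placements that fit entirely inside the park are tried.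
-- intended difference: On parks with no columns (an empty park or an empty first row) when 0 is among mats, A returns -1 because its column loop never runs and so never records the trivially placeable size-0 mat, while B returns 0; a size-0 mat fits anywhere, so 0 is the intended value. — e.g. on solution([0], []): A returns -1, B returns 0
import Mathlib
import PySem

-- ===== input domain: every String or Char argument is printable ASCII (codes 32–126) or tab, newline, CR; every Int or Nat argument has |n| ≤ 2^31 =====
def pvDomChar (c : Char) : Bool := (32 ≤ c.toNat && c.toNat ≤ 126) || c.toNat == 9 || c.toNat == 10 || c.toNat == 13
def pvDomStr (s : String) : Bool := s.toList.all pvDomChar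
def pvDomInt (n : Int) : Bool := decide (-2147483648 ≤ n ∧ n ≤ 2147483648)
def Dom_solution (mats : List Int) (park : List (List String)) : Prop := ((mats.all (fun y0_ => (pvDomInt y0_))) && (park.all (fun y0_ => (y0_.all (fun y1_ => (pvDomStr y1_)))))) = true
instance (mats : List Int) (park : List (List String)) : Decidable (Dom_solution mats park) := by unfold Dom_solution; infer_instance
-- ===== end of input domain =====

-- B replaces A's per-placement mat×mat cell scan by a one-pass table of horizontal "-1" run
-- lengths, checking each placement with mat row lookups (objective: faster, asymptotic in mat).

-- ===== PORT A =====
def solution (mats : List Int) (park : List (List String)) : Int :=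
  mats.foldl (fun answer mat =>
    (PySem.List.pyRange 0 (park.length : Int) 1).foldl (fun answer i =>
      (PySem.List.pyRange 0 ((PySem.List.pyGetD park 0 []).length : Int) 1).foldl (fun answer j =>
        let count : Int :=
          (PySem.List.pyRange 0 mat 1).foldl (fun count row =>
            (PySem.List.pyRange 0 mat 1).foldl (fun count col =>
              if (park.length : Int) ≤ row + i ∨ ((PySem.List.pyGetD park 0 []).length : Int) ≤ col + j then
                count
              else if PySem.List.pyGetD (PySem.List.pyGetD park (i + row) []) (j + col) "" == "-1" then
                count + 1
              else count) count) 0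
        if count = mat ^ 2 then max answer mat else answer) answer) answer) (-1)

-- ===== PORT B =====
def solution_alt (mats : List Int) (park : List (List String)) : Int :=
  let R : Int := park.length
  let C : Int := if park.isEmpty then 0 else ((PySem.List.pyGetD park 0 []).length : Int)
  let runs : List (List Int) :=
    park.foldl (fun runs row =>
      let s : Int × List Int :=
        (PySem.List.slice row none (some C)).foldl (fun (p : Int × List Int) x =>
          let run : Int := if x == "-1" then p.1 + 1 else 0
          (run, p.2 ++ [run])) (0, [])
      runs ++ [s.2]) []
  mats.foldl (fun best m =>
    if 0 ≤ m ∧ m ≤ R ∧ m ≤ C then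
      if (PySem.List.pyRange 0 (R - m + 1) 1).any (fun i =>
          (PySem.List.pyRange 0 (C - m + 1) 1).any (fun j =>
            (PySem.List.pyRange 0 m 1).all (fun r =>
              decide (m ≤ PySem.List.pyGetD (PySem.List.pyGetD runs (i + r) []) (j + m - 1) 0)))) then
        max best m
      else best
    else best) (-1)

-- ===== PRECONDITION & SPEC =====
-- Pre_ excludes exactly the inputs on which A raises IndexError: a ragged park (some row
-- shorter than the first row) together with some mat ≥ 1 makes A's mat×mat scan, whose column
-- guard uses len(park[0]), index past the end of a short row; whenever every mat < 1 the scan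
-- loops are empty and A returns normally, so those inputs stay inside Pre_.
def Pre_solution (mats : List Int) (park : List (List String)) : Prop :=
  (∀ row ∈ park, (PySem.List.pyGetD park 0 []).length ≤ row.length) ∨ (∀ m ∈ mats, m < 1)
instance (mats : List Int) (park : List (List String)) : Decidable (Pre_solution mats park) := by
  unfold Pre_solution; infer_instance

def pvWitness_solution : List Int × List (List String) := ([1], [["-1"]])

-- On parks with no columns (an empty park or an empty first row) when 0 is among mats, A
-- returns -1 (its column loop never runs, so the trivially placeable size-0 mat is never
-- recorded) while B returns 0, the intended value: a size-0 mat fits anywhere.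
def D_solution (mats : List Int) (park : List (List String)) : Prop :=
  (PySem.List.pyGetD park 0 []).length = 0 ∧ (0 : Int) ∈ mats
instance (mats : List Int) (park : List (List String)) : Decidable (D_solution mats park) := by
  unfold D_solution; infer_instance

def Spec_solution (mats : List Int) (park : List (List String)) (out : Int) : Prop :=
  ¬ D_solution mats park → out = solution_alt mats park
instance (mats : List Int) (park : List (List String)) (out : Int) : Decidable (Spec_solution mats park out) := by
  unfold Spec_solution; infer_instance

def pvDiffWitness_solution : List Int × List (List String) := ([0], [])
def pvDiffWitnessOut_solution : Int × Int := (-1, 0)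

-- ===== CLAIM (what is proved, stated in full; the proofs are below) =====
def Claim_unchanged_solution : Prop := ∀ (mats : List Int) (park : List (List String)), Dom_solution mats park → Pre_solution mats park → Spec_solution mats park (solution mats park)
def Claim_changed_solution : Prop := Dom_solution (pvDiffWitness_solution.1) (pvDiffWitness_solution.2) ∧ Pre_solution (pvDiffWitness_solution.1) (pvDiffWitness_solution.2) ∧ D_solution (pvDiffWitness_solution.1) (pvDiffWitness_solution.2) ∧ solution (pvDiffWitness_solution.1) (pvDiffWitness_solution.2) = pvDiffWitnessOut_solution.1 ∧ solution_alt (pvDiffWitness_solution.1) (pvDiffWitness_solution.2) = pvDiffWitnessOut_solution.2 ∧ pvDiffWitnessOut_solution.1 ≠ pvDiffWitnessOut_solution.2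
def Claim_exact_solution : Prop := ∀ (mats : List Int) (park : List (List String)), Dom_solution mats park → Pre_solution mats park → D_solution mats park → solution mats park ≠ solution_alt mats park


-- ===== LEMMAS AND PROOFS =====

-- Shorthands for the proof (park dimensions and cell access, Nat-indexed).
abbrev pvC (park : List (List String)) : Nat := (park.getD 0 []).length

abbrev pvCell (park : List (List String)) (a b : Nat) : String := (park.getD a []).getD b ""

-- "a k×k all-'-1' square fits at some position" — the common meaning of both programs' tests.
abbrev pvAch (park : List (List String)) (k : Nat) : Prop :=
  ∃ i < park.length, ∃ j < pvC park, i + k ≤ park.length ∧ j + k ≤ pvC park ∧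
    ∀ r < k, ∀ c < k, pvCell park (i + r) (j + c) = "-1"

-- mat m is recorded by either program (for C > 0 they agree; proved below).
abbrev pvAchI (park : List (List String)) (m : Int) : Prop :=
  (m = 0 ∧ 0 < park.length ∧ 0 < pvC park) ∨ (1 ≤ m ∧ pvAch park m.toNat)

-- A's inner count for a given mat and position.
abbrev pvCnt (park : List (List String)) (mat i j : Int) : Int :=
  (PySem.List.pyRange 0 mat 1).foldl (fun count row =>
    (PySem.List.pyRange 0 mat 1).foldl (fun count col =>
      if (park.length : Int) ≤ row + i ∨ ((PySem.List.pyGetD park 0 []).length : Int) ≤ col + j then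
        count
      else if PySem.List.pyGetD (PySem.List.pyGetD park (i + row) []) (j + col) "" == "-1" then
        count + 1
      else count) count) 0

abbrev pvStepA (park : List (List String)) (answer mat : Int) : Int :=
  (PySem.List.pyRange 0 (park.length : Int) 1).foldl (fun answer i =>
    (PySem.List.pyRange 0 ((PySem.List.pyGetD park 0 []).length : Int) 1).foldl (fun answer j =>
      if pvCnt park mat i j = mat ^ 2 then max answer mat else answer) answer) answer

abbrev pvRuns (park : List (List String)) : List (List Int) :=
  park.foldl (fun runs row =>
    let s : Int × List Int :=
      (PySem.List.slice row none (some ((PySem.List.pyGetD park 0 []).length : Int))).foldl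
        (fun (p : Int × List Int) x =>
          let run : Int := if x == "-1" then p.1 + 1 else 0
          (run, p.2 ++ [run])) (0, [])
    runs ++ [s.2]) []

abbrev pvStepB (park : List (List String)) (best m : Int) : Int :=
  if 0 ≤ m ∧ m ≤ (park.length : Int) ∧ m ≤ ((PySem.List.pyGetD park 0 []).length : Int) then
    if (PySem.List.pyRange 0 ((park.length : Int) - m + 1) 1).any (fun i =>
        (PySem.List.pyRange 0 (((PySem.List.pyGetD park 0 []).length : Int) - m + 1) 1).any (fun j =>
          (PySem.List.pyRange 0 m 1).all (fun r =>
            decide (m ≤ PySem.List.pyGetD (PySem.List.pyGetD (pvRuns park) (i + r) []) (j + m - 1) 0)))) then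
      max best m
    else best
  else best

theorem pv_solution_eq (mats : List Int) (park : List (List String)) :
    solution mats park = mats.foldl (pvStepA park) (-1) := rfl

theorem pv_solution_alt_eq (mats : List Int) (park : List (List String)) :
    solution_alt mats park = mats.foldl (pvStepB park) (-1) := by
  cases park <;> rfl

-- a loop that records "max with m" whenever a test holds is "max with m if any element passes"
theorem pv_foldl_max_if {α : Type} (p : α → Prop) [DecidablePred p] (l : List α) (a m : Int) :
    l.foldl (fun ans x => if p x then max ans m else ans) a
      = if ∃ x ∈ l, p x then max a m else a := by
  induction l generalizing a with
  | nil => simp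
  | cons x t ih =>
    simp only [List.foldl_cons]
    by_cases h : p x
    · rw [if_pos h, ih]
      by_cases h2 : ∃ y ∈ t, p y
      · simp [h, h2, max_assoc]
      · simp [h, h2]
    · rw [if_neg h, ih]
      by_cases h2 : ∃ y ∈ t, p y <;> simp [h, h2]

theorem pv_sum_le {α : Type} (l : List α) (f : α → Nat) (k : Nat) (hb : ∀ x ∈ l, f x ≤ k) :
    (l.map (fun x => (f x : Int))).sum ≤ (l.length : Int) * k := by
  induction l with
  | nil => simp
  | cons x t ih =>
    have h1 : (f x : Int) ≤ (k : Int) := by exact_mod_cast hb x (by simp)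
    have h2 := ih (fun y hy => hb y (by simp [hy]))
    have hexp : ((x :: t).length : Int) * k = (t.length : Int) * k + k := by
      simp [List.length_cons]; ring
    simp only [List.map_cons, List.sum_cons]
    rw [hexp]
    linarith

theorem pv_sum_eq_iff {α : Type} (l : List α) (f : α → Nat) (k : Nat) (hb : ∀ x ∈ l, f x ≤ k) :
    ((l.map (fun x => (f x : Int))).sum = (l.length : Int) * k) ↔ ∀ x ∈ l, f x = k := by
  induction l with
  | nil => simp
  | cons x t ih =>
    have h1 : (f x : Int) ≤ (k : Int) := by exact_mod_cast hb x (by simp)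
    have h2 := ih (fun y hy => hb y (by simp [hy]))
    have hle := pv_sum_le t f k (fun y hy => hb y (by simp [hy]))
    have hexp : ((x :: t).length : Int) * k = (t.length : Int) * k + k := by
      simp [List.length_cons]; ring
    simp only [List.map_cons, List.sum_cons]
    rw [hexp]
    constructor
    · intro h
      have hfx : (f x : Int) = k := by linarith
      have hS : (t.map (fun y => (f y : Int))).sum = (t.length : Int) * k := by linarith
      intro y hy
      rcases List.mem_cons.1 hy with rfl | hy
      · exact_mod_cast hfx
      · exact (h2.1 hS) y hy
    · intro h
      have hfx : f x = k := h x (by simp)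
      have hS := h2.2 (fun y hy => h y (by simp [hy]))
      rw [hS, hfx]
      ring

-- characterisation of A's count: it hits mat² exactly when the square fits and is all "-1"
theorem pv_cnt_eq_iff (park : List (List String))
    (mat i j : Int) (hm : 1 ≤ mat) (hi : 0 ≤ i) (hj : 0 ≤ j) :
    pvCnt park mat i j = mat ^ 2 ↔
      (i + mat ≤ (park.length : Int) ∧ j + mat ≤ (pvC park : Int) ∧
        ∀ r < mat.toNat, ∀ c < mat.toNat, pvCell park (i.toNat + r) (j.toNat + c) = "-1") := by
  have hCpv : ((PySem.List.pyGetD park 0 []).length : Int) = (pvC park : Int) := by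
    rw [PySem.List.pyGetD_zero]
  have hmk : ((mat.toNat : Nat) : Int) = mat := Int.toNat_of_nonneg (by omega)
  have hlen : (PySem.List.pyRange 0 mat 1).length = mat.toNat := by
    rw [PySem.List.length_pyRange_one]; simp
  set q : Int → Int → Bool := fun row col =>
      decide (row + i < (park.length : Int)) &&
      decide (col + j < ((PySem.List.pyGetD park 0 []).length : Int)) &&
      (PySem.List.pyGetD (PySem.List.pyGetD park (i + row) []) (j + col) "" == "-1") with hq
  have hinner : ∀ (row cnt : Int),
      (PySem.List.pyRange 0 mat 1).foldl (fun count col =>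
        if (park.length : Int) ≤ row + i ∨ ((PySem.List.pyGetD park 0 []).length : Int) ≤ col + j then
          count
        else if PySem.List.pyGetD (PySem.List.pyGetD park (i + row) []) (j + col) "" == "-1" then
          count + 1
        else count) cnt
      = cnt + ((PySem.List.pyRange 0 mat 1).countP (q row) : Int) := by
    intro row cnt
    rw [← PySem.List.foldl_if_add_one]
    apply PySem.List.foldl_congr_mem
    intro acc col _
    rw [hq]
    by_cases h1 : (park.length : Int) ≤ row + i <;>
      by_cases h2 : ((PySem.List.pyGetD park 0 []).length : Int) ≤ col + j <;>
      by_cases h3 : (PySem.List.pyGetD (PySem.List.pyGetD park (i + row) []) (j + col) "" == "-1") = true <;>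
      simp [h1, h2, h3]
  have houter : pvCnt park mat i j
      = 0 + ((PySem.List.pyRange 0 mat 1).map
          (fun row => (((PySem.List.pyRange 0 mat 1).countP (q row) : Nat) : Int))).sum := by
    rw [← PySem.List.foldl_add]
    apply PySem.List.foldl_congr_mem
    intro acc row _
    exact hinner row acc
  have hble : ∀ row ∈ PySem.List.pyRange 0 mat 1,
      (PySem.List.pyRange 0 mat 1).countP (q row) ≤ mat.toNat := by
    intro row _
    rw [← hlen]
    exact List.countP_le_length
  have hsq : mat ^ 2 = ((PySem.List.pyRange 0 mat 1).length : Int) * (mat.toNat : Int) := by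
    rw [hlen, hmk]; ring
  rw [houter, zero_add, hsq, pv_sum_eq_iff _ _ _ hble]
  constructor
  · intro h
    have hall : ∀ row, 0 ≤ row → row < mat → ∀ col, 0 ≤ col → col < mat →
        (row + i < (park.length : Int) ∧
          col + j < ((PySem.List.pyGetD park 0 []).length : Int) ∧
          PySem.List.pyGetD (PySem.List.pyGetD park (i + row) []) (j + col) "" = "-1") := by
      intro row h0 h1 col h2 h3
      have hrow : row ∈ PySem.List.pyRange 0 mat 1 := PySem.List.mem_pyRange_one.2 ⟨h0, h1⟩
      have hcol : col ∈ PySem.List.pyRange 0 mat 1 := PySem.List.mem_pyRange_one.2 ⟨h2, h3⟩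
      have := List.countP_eq_length.1 ((h row hrow).trans hlen.symm) col hcol
      rw [hq] at this
      simpa [Bool.and_eq_true, decide_eq_true_eq, and_assoc] using this
    refine ⟨?_, ?_, ?_⟩
    · have h1 := (hall (mat - 1) (by omega) (by omega) 0 (by omega) (by omega)).1
      omega
    · have h2 := (hall 0 (by omega) (by omega) (mat - 1) (by omega) (by omega)).2.1
      omega
    · intro r hr c hc
      have hcell := (hall (r : Int) (by omega) (by omega) (c : Int) (by omega) (by omega)).2.2
      have e1 : i + (r : Int) = ((i.toNat + r : Nat) : Int) := by omega
      have e2 : j + (c : Int) = ((j.toNat + c : Nat) : Int) := by omega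
      rw [e1, e2, PySem.List.pyGetD_natCast, PySem.List.pyGetD_natCast] at hcell
      exact hcell
  · rintro ⟨hfit1, hfit2, hcells⟩
    intro row hrow
    rw [PySem.List.mem_pyRange_one] at hrow
    have hq1 : ∀ col ∈ PySem.List.pyRange 0 mat 1, q row col = true := by
      intro col hcol
      rw [PySem.List.mem_pyRange_one] at hcol
      have e1 : i + row = ((i.toNat + row.toNat : Nat) : Int) := by omega
      have e2 : j + col = ((j.toNat + col.toNat : Nat) : Int) := by omega
      have hcell := hcells row.toNat (by omega) col.toNat (by omega)
      rw [hq]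
      simp only [Bool.and_eq_true, decide_eq_true_eq, beq_iff_eq]
      refine ⟨⟨by omega, by omega⟩, ?_⟩
      rw [e1, e2, PySem.List.pyGetD_natCast, PySem.List.pyGetD_natCast]
      exact hcell
    exact (List.countP_eq_length.2 hq1).trans hlen

-- B's run-length table
def pvOut : List String → Int → List Int
  | [], _ => []
  | x :: xs, r =>
    let r' := if x == "-1" then r + 1 else 0
    r' :: pvOut xs r'

theorem pvOut_fold (xs : List String) (r : Int) (acc : List Int) :
    (xs.foldl (fun (p : Int × List Int) x =>
        let run : Int := if x == "-1" then p.1 + 1 else 0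
        (run, p.2 ++ [run])) (r, acc)).2 = acc ++ pvOut xs r := by
  induction xs generalizing r acc with
  | nil => simp [pvOut]
  | cons x xs ih =>
    simp only [List.foldl_cons]
    have h := ih (if x == "-1" then r + 1 else 0) (acc ++ [if x == "-1" then r + 1 else 0])
    simpa [pvOut] using h

theorem pvOut_le (xs : List String) (r : Int) (j : Nat) (hr : 0 ≤ r) (hj : j < xs.length) :
    (pvOut xs r).getD j 0 ≤ r + (j : Int) + 1 := by
  induction xs generalizing r j with
  | nil => simp at hj
  | cons x xs ih =>
    cases j with
    | zero =>
      simp only [pvOut, List.getD_cons_zero]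
      split <;> omega
    | succ j =>
      have hj' : j < xs.length := by simpa using hj
      simp only [pvOut, List.getD_cons_succ]
      by_cases hx : (x == "-1") = true
      · have := ih (r + 1) j (by omega) hj'
        simp only [hx, if_true]
        push_cast at this ⊢
        omega
      · have := ih 0 j le_rfl hj'
        simp only [hx, Bool.false_eq_true, if_false]
        push_cast at this ⊢
        omega

theorem pvOut_full (xs : List String) (r : Int) (j : Nat) (hj : j < xs.length)
    (h : ∀ t ≤ j, xs.getD t "" = "-1") :
    (pvOut xs r).getD j 0 = r + (j : Int) + 1 := by
  induction xs generalizing r j with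
  | nil => simp at hj
  | cons x xs ih =>
    have hx : x = "-1" := by simpa using h 0 (Nat.zero_le _)
    cases j with
    | zero => simp [pvOut, hx]
    | succ j =>
      have hj' : j < xs.length := by simpa using hj
      have h' : ∀ t ≤ j, xs.getD t "" = "-1" := by
        intro t ht
        have := h (t + 1) (by omega)
        simpa [List.getD_cons_succ] using this
      simp only [pvOut, hx, List.getD_cons_succ]
      have := ih (r + 1) j hj' h'
      simp only [beq_self_eq_true, if_true]
      rw [this]
      push_cast
      ring

theorem pvOut_ge (xs : List String) (r : Int) (k j : Nat) (hr : 0 ≤ r) (hk : 1 ≤ k)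
    (hkj : k ≤ j + 1) (hj : j < xs.length) :
    ((k : Int) ≤ (pvOut xs r).getD j 0) ↔ ∀ t < k, xs.getD (j - t) "" = "-1" := by
  induction xs generalizing r j k with
  | nil => simp at hj
  | cons x tl ih =>
    cases j with
    | zero =>
      have hk1 : k = 1 := by omega
      subst hk1
      by_cases hx : (x == "-1") = true
      · have hx' : x = "-1" := by simpa using hx
        simp only [pvOut, hx, if_true, List.getD_cons_zero]
        constructor
        · intro _ t ht
          interval_cases t
          simpa using hx'
        · intro _; omega
      · have hx' : ¬ x = "-1" := by simpa using hx
        simp only [pvOut, hx, Bool.false_eq_true, if_false, List.getD_cons_zero]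
        constructor
        · intro h; omega
        · intro h
          exact absurd (by simpa using h 0 (by omega)) hx'
    | succ j =>
      have hj' : j < tl.length := by simpa using hj
      have hgd : (pvOut (x :: tl) r).getD (j + 1) 0
          = (pvOut tl (if x == "-1" then r + 1 else 0)).getD j 0 := by
        simp [pvOut]
      have hr'0 : (0 : Int) ≤ (if x == "-1" then r + 1 else 0) := by split <;> omega
      rcases Nat.lt_or_ge k (j + 2) with hkk | hkk
      · -- k ≤ j + 1 : the accumulator is irrelevant
        rw [hgd, ih _ _ _ hr'0 hk (by omega) hj']
        constructor
        · intro h t ht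
          have hte : j + 1 - t = (j - t) + 1 := by omega
          rw [hte, List.getD_cons_succ]
          exact h t ht
        · intro h t ht
          have hte : j + 1 - t = (j - t) + 1 := by omega
          have := h t ht
          rwa [hte, List.getD_cons_succ] at this
      · -- k = j + 2 : the whole prefix (and the accumulator) is needed
        have hk2 : k = j + 2 := by omega
        rw [hgd]
        constructor
        · intro hval
          have hx : (x == "-1") = true := by
            by_contra hxne
            rw [if_neg hxne] at hval
            have hle := pvOut_le tl 0 j le_rfl hj'
            omega
          rw [if_pos hx] at hval
          have h2 : ∀ t < j + 1, tl.getD (j - t) "" = "-1" := by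
            refine (ih (r + 1) (j + 1) j (by omega) (by omega) (by omega) hj').1 (by omega)
          intro t ht
          rcases Nat.lt_or_ge t (j + 1) with ht' | ht'
          · have hte : j + 1 - t = (j - t) + 1 := by omega
            rw [hte, List.getD_cons_succ]
            exact h2 t ht'
          · have hte : j + 1 - t = 0 := by omega
            rw [hte, List.getD_cons_zero]
            simpa using hx
        · intro hall
          have hx' : x = "-1" := by
            have := hall (j + 1) (by omega)
            simpa using this
          have hfull : ∀ t ≤ j, tl.getD t "" = "-1" := by
            intro t htle
            have hte : j + 1 - (j - t) = t + 1 := by omega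
            have := hall (j - t) (by omega)
            rwa [hte, List.getD_cons_succ] at this
          rw [if_pos (by simpa using hx'), pvOut_full tl (r + 1) j hj' hfull]
          push_cast
          omega

theorem pvRuns_eq (park : List (List String)) :
    pvRuns park
      = park.map (fun row => pvOut (PySem.List.slice row none (some ((PySem.List.pyGetD park 0 []).length : Int))) 0) := by
  have aux : ∀ (l : List (List String)) (acc : List (List Int)),
      (l.foldl (fun runs row =>
        let s : Int × List Int :=
          (PySem.List.slice row none (some ((PySem.List.pyGetD park 0 []).length : Int))).foldl
            (fun (p : Int × List Int) x =>
              let run : Int := if x == "-1" then p.1 + 1 else 0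
              (run, p.2 ++ [run])) (0, [])
        runs ++ [s.2]) acc)
        = acc ++ l.map (fun row =>
            pvOut (PySem.List.slice row none (some ((PySem.List.pyGetD park 0 []).length : Int))) 0) := by
    intro l
    induction l with
    | nil => simp
    | cons row l ih =>
      intro acc
      rw [List.foldl_cons, ih]
      show (acc ++ [(List.foldl _ ((0 : Int), ([] : List Int)) _).2]) ++ _ = _
      rw [pvOut_fold]
      simp
  exact aux park []

-- reading one entry of B's run table (indices in range, Nat form)
theorem pv_val_ge_iff (park : List (List String))
    (hpre : ∀ row ∈ park, pvC park ≤ row.length)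
    (n : Nat) (hn : n < park.length) (u : Nat) (hu : u < pvC park)
    (k : Nat) (hk : 1 ≤ k) (hku : k ≤ u + 1) :
    ((k : Int) ≤ PySem.List.pyGetD (PySem.List.pyGetD (pvRuns park) ((n : Nat) : Int) []) ((u : Nat) : Int) 0)
      ↔ ∀ t < k, pvCell park n (u - t) = "-1" := by
  have hrowlen : pvC park ≤ (park.getD n []).length :=
    hpre _ (by rw [List.getD_eq_getElem _ _ hn]; exact List.getElem_mem hn)
  have hCe : ((PySem.List.pyGetD park 0 []).length : Int) = ((pvC park : Nat) : Int) := by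
    rw [PySem.List.pyGetD_zero]
  have hrow : PySem.List.pyGetD (pvRuns park) ((n : Nat) : Int) []
      = pvOut ((park.getD n []).take (pvC park)) 0 := by
    rw [PySem.List.pyGetD_natCast, pvRuns_eq]
    rw [List.getD_eq_getElem _ _ (by simpa using hn), List.getElem_map]
    rw [PySem.List.slice_to_natCast, PySem.List.pyGetD_zero]
    rw [List.getD_eq_getElem _ _ hn]
  have htklen : u < ((park.getD n []).take (pvC park)).length := by
    simp only [List.length_take]
    omega
  have htake : ∀ v : Nat, v < pvC park →
      ((park.getD n []).take (pvC park)).getD v "" = pvCell park n v := by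
    intro v hv
    unfold List.getD
    rw [List.getElem?_take]
    simp [hv]
  rw [hrow, PySem.List.pyGetD_natCast]
  rw [pvOut_ge _ 0 k u le_rfl hk hku htklen]
  constructor
  · intro h t ht
    have := h t ht
    rwa [htake _ (by omega)] at this
  · intro h t ht
    rw [htake _ (by omega)]
    exact h t ht

theorem pv_anyB_iff (park : List (List String))
    (hpre : ∀ row ∈ park, pvC park ≤ row.length) (m : Int) (hm : 1 ≤ m) :
    (((PySem.List.pyRange 0 ((park.length : Int) - m + 1) 1).any fun i =>
      (PySem.List.pyRange 0 (((PySem.List.pyGetD park 0 []).length : Int) - m + 1) 1).any fun j =>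
        (PySem.List.pyRange 0 m 1).all fun r =>
          decide (m ≤ PySem.List.pyGetD (PySem.List.pyGetD (pvRuns park) (i + r) []) (j + m - 1) 0)) = true)
      ↔ pvAch park m.toNat := by
  have hCpv : ((PySem.List.pyGetD park 0 []).length : Int) = (pvC park : Int) := by
    rw [PySem.List.pyGetD_zero]
  have hmk : ((m.toNat : Nat) : Int) = m := by omega
  constructor
  · intro h
    rw [List.any_eq_true] at h
    obtain ⟨iI, hiI, h⟩ := h
    rw [PySem.List.mem_pyRange_one] at hiI
    rw [List.any_eq_true] at h
    obtain ⟨jI, hjI, hall⟩ := h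
    rw [PySem.List.mem_pyRange_one] at hjI
    rw [List.all_eq_true] at hall
    refine ⟨iI.toNat, by omega, jI.toNat, by omega, by omega, by omega, ?_⟩
    intro r hr c hc
    have hr0 := hall (r : Int) (by rw [PySem.List.mem_pyRange_one]; omega)
    rw [decide_eq_true_eq] at hr0
    have e1 : iI + (r : Int) = ((iI.toNat + r : Nat) : Int) := by omega
    have e2 : jI + m - 1 = ((jI.toNat + m.toNat - 1 : Nat) : Int) := by omega
    rw [e1, e2] at hr0
    have hv := (pv_val_ge_iff park hpre (iI.toNat + r) (by omega) (jI.toNat + m.toNat - 1)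
        (by omega) m.toNat (by omega) (by omega)).1 (by rw [hmk]; exact hr0)
    have hv' := hv (m.toNat - 1 - c) (by omega)
    have e3 : jI.toNat + m.toNat - 1 - (m.toNat - 1 - c) = jI.toNat + c := by omega
    rwa [e3] at hv'
  · rintro ⟨a', ha', b', hb', hak, hbk, hcells⟩
    rw [List.any_eq_true]
    refine ⟨(a' : Int), by rw [PySem.List.mem_pyRange_one]; omega, ?_⟩
    rw [List.any_eq_true]
    refine ⟨(b' : Int), by rw [PySem.List.mem_pyRange_one]; omega, ?_⟩
    rw [List.all_eq_true]
    intro r0 hr0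
    rw [PySem.List.mem_pyRange_one] at hr0
    rw [decide_eq_true_eq]
    have e1 : (a' : Int) + r0 = ((a' + r0.toNat : Nat) : Int) := by omega
    have e2 : (b' : Int) + m - 1 = ((b' + m.toNat - 1 : Nat) : Int) := by omega
    have hcellp : ∀ t < m.toNat, pvCell park (a' + r0.toNat) (b' + m.toNat - 1 - t) = "-1" := by
      intro t ht
      have hcc := hcells r0.toNat (by omega) (m.toNat - 1 - t) (by omega)
      have e3 : b' + m.toNat - 1 - t = b' + (m.toNat - 1 - t) := by omega
      rwa [e3]
    have hv := (pv_val_ge_iff park hpre (a' + r0.toNat) (by omega) (b' + m.toNat - 1) (by omega)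
        m.toNat (by omega) (by omega)).2 hcellp
    rw [e1, e2]
    omega

theorem pv_stepA_eq (park : List (List String)) (hne : park ≠ []) (hC : 0 < pvC park) (a m : Int) :
    pvStepA park a m = if pvAchI park m then max a m else a := by
  have hR0 : 0 < park.length := by cases park with
    | nil => exact absurd rfl hne
    | cons _ _ => simp
  have hCpv : ((PySem.List.pyGetD park 0 []).length : Int) = (pvC park : Int) := by
    rw [PySem.List.pyGetD_zero]
  have hinner : ∀ (i ans : Int),
      (PySem.List.pyRange 0 ((PySem.List.pyGetD park 0 []).length : Int) 1).foldl
        (fun answer j => if pvCnt park m i j = m ^ 2 then max answer m else answer) ans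
      = if (∃ j ∈ PySem.List.pyRange 0 ((PySem.List.pyGetD park 0 []).length : Int) 1,
            pvCnt park m i j = m ^ 2) then max ans m else ans := by
    intro i ans
    exact pv_foldl_max_if _ _ ans m
  unfold pvStepA
  simp only [hinner]
  rw [pv_foldl_max_if (fun i => ∃ j ∈ PySem.List.pyRange 0
      ((PySem.List.pyGetD park 0 []).length : Int) 1, pvCnt park m i j = m ^ 2) _ a m]
  have key : (∃ i ∈ PySem.List.pyRange 0 (park.length : Int) 1,
      ∃ j ∈ PySem.List.pyRange 0 ((PySem.List.pyGetD park 0 []).length : Int) 1,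
        pvCnt park m i j = m ^ 2) ↔ pvAchI park m := by
    rcases lt_trichotomy m 0 with hm | hm0 | hm
    · have hcnt : ∀ i j : Int, pvCnt park m i j = 0 := by
        intro i j
        unfold pvCnt
        rw [PySem.List.pyRange_one_eq_nil (by omega)]
        rfl
      have hm2 : m ^ 2 ≠ 0 := pow_ne_zero 2 (by omega)
      apply iff_of_false
      · rintro ⟨i, _, j, _, hcc⟩
        rw [hcnt] at hcc
        exact hm2 hcc.symm
      · rintro (⟨h0, _⟩ | ⟨h1, _⟩) <;> omega
    · subst hm0
      have hcnt : ∀ i j : Int, pvCnt park 0 i j = 0 := by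
        intro i j
        unfold pvCnt
        rw [PySem.List.pyRange_one_eq_nil le_rfl]
        rfl
      apply iff_of_true
      · refine ⟨0, by rw [PySem.List.mem_pyRange_one]; omega, 0,
          by rw [PySem.List.mem_pyRange_one]; omega, by rw [hcnt]; norm_num⟩
      · exact Or.inl ⟨rfl, hR0, hC⟩
    · constructor
      · rintro ⟨i, hi, j, hj, hcc⟩
        rw [PySem.List.mem_pyRange_one] at hi hj
        rw [pv_cnt_eq_iff park m i j hm hi.1 hj.1] at hcc
        obtain ⟨hf1, hf2, hcells⟩ := hcc
        exact Or.inr ⟨hm, i.toNat, by omega, j.toNat, by omega, by omega, by omega, hcells⟩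
      · rintro (⟨hm0, _⟩ | ⟨_, a', ha', b', hb', hak, hbk, hcells⟩)
        · omega
        · refine ⟨(a' : Int), by rw [PySem.List.mem_pyRange_one]; omega,
            (b' : Int), by rw [PySem.List.mem_pyRange_one]; omega, ?_⟩
          rw [pv_cnt_eq_iff park m _ _ hm (by omega) (by omega)]
          refine ⟨by omega, by omega, ?_⟩
          simpa using hcells
  simp only [key]

-- A's step ignores a mat < 0: the mat×mat scan is empty but mat² > 0.
theorem pv_stepA_neg (park : List (List String)) (a m : Int) (hm : m < 0) :
    pvStepA park a m = a := by
  have hcnt : ∀ i j : Int, pvCnt park m i j = 0 := by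
    intro i j
    unfold pvCnt
    rw [PySem.List.pyRange_one_eq_nil (by omega)]
    rfl
  have hm2 : (0 : Int) ≠ m ^ 2 := (pow_ne_zero 2 (by omega : m ≠ 0)).symm
  have hj : ∀ (i ans : Int),
      (PySem.List.pyRange 0 ((PySem.List.pyGetD park 0 []).length : Int) 1).foldl
        (fun answer j => if pvCnt park m i j = m ^ 2 then max answer m else answer) ans = ans := by
    intro i ans
    rw [PySem.List.foldl_congr_mem _ _ (fun (a : Int) (_ : Int) => a) ans
        (fun acc j _ => by rw [hcnt, if_neg hm2]),
      PySem.List.foldl_ignore]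
  unfold pvStepA
  rw [PySem.List.foldl_congr_mem _ _ (fun (a : Int) (_ : Int) => a) a
      (fun acc i _ => hj i acc),
    PySem.List.foldl_ignore]

-- B's step always records a mat of size 0 (an empty square fits vacuously).
theorem pv_stepB_zero (park : List (List String)) (a : Int) :
    pvStepB park a 0 = max a 0 := by
  unfold pvStepB
  rw [if_pos ⟨le_rfl, by omega, by omega⟩]
  split
  · rfl
  next h =>
  exfalso
  apply h
  rw [List.any_eq_true]
  refine ⟨0, by rw [PySem.List.mem_pyRange_one]; omega, ?_⟩
  rw [List.any_eq_true]
  refine ⟨0, by rw [PySem.List.mem_pyRange_one]; omega, ?_⟩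
  rw [PySem.List.pyRange_one_eq_nil le_rfl]
  rfl

theorem pv_stepB_eq (park : List (List String)) (hne : park ≠ [])
    (hpre : ∀ row ∈ park, pvC park ≤ row.length) (hC : 0 < pvC park) (a m : Int) :
    pvStepB park a m = if pvAchI park m then max a m else a := by
  have hR0 : 0 < park.length := by cases park with
    | nil => exact absurd rfl hne
    | cons _ _ => simp
  have hCpv : ((PySem.List.pyGetD park 0 []).length : Int) = (pvC park : Int) := by
    rw [PySem.List.pyGetD_zero]
  unfold pvStepB
  rcases lt_trichotomy m 0 with hm | hm0 | hm
  · rw [if_neg (by rintro ⟨h1, _, _⟩; omega),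
      if_neg (by rintro (⟨h0, _⟩ | ⟨h1, _⟩) <;> omega)]
  · subst hm0
    have := pv_stepB_zero park a
    unfold pvStepB at this
    rw [this, if_pos (Or.inl ⟨rfl, hR0, hC⟩)]
  · by_cases hg : m ≤ (park.length : Int) ∧ m ≤ ((PySem.List.pyGetD park 0 []).length : Int)
    · rw [if_pos ⟨by omega, hg.1, hg.2⟩]
      have hiff := pv_anyB_iff park hpre m hm
      by_cases hach : pvAch park m.toNat
      · rw [if_pos (hiff.2 hach), if_pos (Or.inr ⟨hm, hach⟩)]
      · have hno : ¬ pvAchI park m := by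
          rintro (⟨h0, _⟩ | ⟨_, hh⟩)
          · omega
          · exact hach hh
        rw [if_neg (fun hcon => hach (hiff.1 hcon)), if_neg hno]
    · have hno : ¬ pvAchI park m := by
        rintro (⟨h0, _⟩ | ⟨_, a', ha', b', hb', hak, hbk, _⟩)
        · omega
        · exact hg ⟨by omega, by omega⟩
      rw [if_neg (by rintro ⟨_, h2, h3⟩; exact hg ⟨h2, h3⟩), if_neg hno]

-- ===== VERDICT (by name: the statement is the Claim_ definition above) =====
theorem solution_spec : Claim_unchanged_solution := by
  intro mats park _hdom hpre hnd
  rw [pv_solution_eq, pv_solution_alt_eq]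
  apply PySem.List.foldl_congr_mem
  intro a m hm
  by_cases hC : 0 < pvC park
  · have hne : park ≠ [] := by
      intro h
      rw [h] at hC
      simp [pvC] at hC
    have hR0 : 0 < park.length := by cases park with
      | nil => exact absurd rfl hne
      | cons _ _ => simp
    rcases hpre with hrows | hsmall
    · have hrows' : ∀ row ∈ park, pvC park ≤ row.length := by
        intro row hrow
        have := hrows row hrow
        rwa [PySem.List.pyGetD_zero] at this
      rw [pv_stepA_eq park hne hC a m, pv_stepB_eq park hne hrows' hC a m]
    · have hm1 : m < 1 := hsmall m hm
      rcases lt_or_eq_of_le (by omega : m ≤ 0) with hneg | h0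
      · rw [pv_stepA_neg park a m hneg]
        unfold pvStepB
        rw [if_neg (by rintro ⟨h1, _, _⟩; omega)]
      · subst h0
        rw [pv_stepA_eq park hne hC a 0, if_pos (Or.inl ⟨rfl, hR0, hC⟩), pv_stepB_zero]
  · have hC0 : pvC park = 0 := by omega
    have hCe : ((PySem.List.pyGetD park 0 []).length : Int) = 0 := by
      rw [PySem.List.pyGetD_zero]
      exact_mod_cast hC0
    have h0 : m ≠ 0 := by
      intro h
      exact hnd ⟨by rw [PySem.List.pyGetD_zero]; exact hC0, h ▸ hm⟩
    have hA : pvStepA park a m = a := by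
      unfold pvStepA
      rw [hCe, PySem.List.pyRange_one_eq_nil le_rfl]
      simp only [List.foldl_nil]
      exact PySem.List.foldl_ignore _ a
    have hB : pvStepB park a m = a := by
      unfold pvStepB
      rw [if_neg]
      rintro ⟨h1, _, h3⟩
      rw [hCe] at h3
      exact h0 (by omega)
    rw [hA, hB]

theorem solution_changed : Claim_changed_solution := by unfold Claim_changed_solution; decide

theorem solution_tight : Claim_exact_solution := by
  intro mats park _hdom _hpre hD
  obtain ⟨hC0', h0⟩ := hD
  have hCe : ((PySem.List.pyGetD park 0 []).length : Int) = 0 := by exact_mod_cast hC0'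
  have hA : solution mats park = -1 := by
    rw [pv_solution_eq]
    have hstep : ∀ (a m : Int), pvStepA park a m = a := by
      intro a m
      unfold pvStepA
      rw [hCe, PySem.List.pyRange_one_eq_nil le_rfl]
      simp only [List.foldl_nil]
      exact PySem.List.foldl_ignore _ a
    rw [PySem.List.foldl_congr_mem mats (pvStepA park) (fun a _ => a) (-1) (fun a m _ => hstep a m),
      PySem.List.foldl_ignore]
  have hB : solution_alt mats park = 0 := by
    rw [pv_solution_alt_eq]
    have hstep : ∀ (a m : Int), pvStepB park a m = if m = 0 then max a 0 else a := by
      intro a m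
      by_cases hm : m = 0
      · subst hm
        rw [pv_stepB_zero, if_pos rfl]
      · unfold pvStepB
        rw [if_neg, if_neg hm]
        rintro ⟨h1, _, h3⟩
        rw [hCe] at h3
        exact hm (by omega)
    rw [PySem.List.foldl_congr_mem mats (pvStepB park) (fun a m => if m = 0 then max a 0 else a)
        (-1) (fun a m _ => hstep a m),
      pv_foldl_max_if (fun m : Int => m = 0) mats (-1) 0, if_pos ⟨0, h0, rfl⟩]
    norm_num
  rw [hA, hB]
  norm_num
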